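-- pv_equiv track=rewrite | github.com/henrikas-svidras/exercises_and_other_coding_stuff | advent_of_code/2022/15_task.py | part1_intervals
-- ===== SOURCE A (Python) =====
-- def part1_intervals(data, target):
--     intervals = []
--     beacons_on_row = set()
--     for (sx, sy), (bx, by) in data.items():
--         d = abs(sx - bx) + abs(sy - by)
--         dy = abs(sy - target)
--         if dy <= d:
--             r = d - dy
--             intervals.append((sx - r, sx + r))
--         if by == target:
--             beacons_on_row.add((bx, by))
--
--     intervals.sort()
--     merged = []
--     for lo, hi in intervals:
--         if not merged or lo > merged[-1][1] + 1:
--             merged.append([lo, hi])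
--         else:
--             merged[-1][1] = max(merged[-1][1], hi)
--
--     covered = sum(hi - lo + 1 for lo, hi in merged)
--     for (bx, _) in beacons_on_row:
--         for lo, hi in merged:
--             if lo <= bx <= hi:
--                 covered -= 1
--                 break
--     return covered
-- ===== SOURCE B (Python) =====
-- def part1_intervals(data, target):
--     # Boundary-event sweep: no interval list, no merging.  Each sensor whose
--     # diamond reaches the row contributes a +1 event at its leftmost covered x
--     # and a -1 event one past its rightmost covered x; sorting the events and
--     # integrating the active counter yields the covered count, and a beacon is
--     # covered iff the prefix-sum of event deltas at its x is positive.
--     events = []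
--     beacon_xs = set()
--     for (sx, sy), (bx, by) in data.items():
--         r = abs(sx - bx) + abs(sy - by) - abs(sy - target)
--         if r >= 0:
--             events.append((sx - r, 1))
--             events.append((sx + r + 1, -1))
--         if by == target:
--             beacon_xs.add(bx)
--     covered = 0
--     active = 0
--     prev = 0
--     for x, d in sorted(events):
--         if active > 0:
--             covered += x - prev
--         prev = x
--         active += d
--     return covered - sum(1 for bx in beacon_xs
--                          if sum(d for x, d in events if x <= bx) > 0)
-- ===== Notes on version B (the rewrite author's own statement) =====
-- stated objective: alternative
-- what changed: B replaces A's sort-intervals-then-merge-then-measure pipeline by a boundary-event sweep line: each sensor emits a +1/-1 event at the edges of its row coverage, the sorted events are integrated with an active counter to get the covered length (no merged interval list is ever built), and on-row beacons are tested by the sign of the prefix-sum of event deltas at their x instead of interval membership.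
import Mathlib
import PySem

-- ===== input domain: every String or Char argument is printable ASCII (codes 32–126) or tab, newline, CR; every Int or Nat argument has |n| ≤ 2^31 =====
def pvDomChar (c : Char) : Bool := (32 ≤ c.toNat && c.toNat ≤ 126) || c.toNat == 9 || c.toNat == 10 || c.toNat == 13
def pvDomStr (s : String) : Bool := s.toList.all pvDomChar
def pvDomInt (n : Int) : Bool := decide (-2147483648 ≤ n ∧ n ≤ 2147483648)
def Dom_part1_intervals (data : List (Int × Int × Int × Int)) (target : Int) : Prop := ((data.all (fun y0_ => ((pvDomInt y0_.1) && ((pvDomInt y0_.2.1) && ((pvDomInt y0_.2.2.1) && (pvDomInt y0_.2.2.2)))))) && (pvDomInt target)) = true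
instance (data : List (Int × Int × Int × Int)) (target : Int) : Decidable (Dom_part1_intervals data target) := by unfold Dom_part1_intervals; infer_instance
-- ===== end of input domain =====

-- B replaces A's sort-intervals/merge/measure pipeline by a boundary-event sweep line:
-- each sensor emits a +1 event at the left edge of its row coverage and a -1 event one past
-- the right edge; integrating the active counter over the sorted events gives the covered
-- count, and a beacon is covered iff the prefix-sum of the event deltas at its x is > 0.
-- Objective: alternative algorithm, same asymptotic cost.

-- ===== PORT A =====
-- body of A's first loop: collect row-intersection intervals and the beacons on the row
def pvStepA (target : Int) (st : List (Int × Int) × PySem.Set (Int × Int))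
    (q : Int × Int × Int × Int) : List (Int × Int) × PySem.Set (Int × Int) :=
  let d := |q.1 - q.2.2.1| + |q.2.1 - q.2.2.2|
  let dy := |q.2.1 - target|
  ((if dy ≤ d then st.1 ++ [(q.1 - (d - dy), q.1 + (d - dy))] else st.1),
   (if q.2.2.2 == target then PySem.Set.add st.2 (q.2.2.1, q.2.2.2) else st.2))

-- A's merge loop body (accumulator kept reversed: head = Python's merged[-1])
def pvMergeStep (acc : List (Int × Int)) (p : Int × Int) : List (Int × Int) :=
  match acc with
  | [] => [(p.1, p.2)]
  | (l, h) :: rest =>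
    if h + 1 < p.1 then (p.1, p.2) :: (l, h) :: rest
    else (l, max h p.2) :: rest

def part1_intervals (data : List (Int × Int × Int × Int)) (target : Int) : Int :=
  let st := data.foldl (pvStepA target) ([], PySem.Set.empty)
  let intervals := PySem.List.sorted2 st.1 (fun p => p.1) (fun p => p.2)
  let merged := (intervals.foldl pvMergeStep []).reverse
  let covered := merged.foldl (fun s p => s + (p.2 - p.1 + 1)) 0
  st.2.foldl (fun c b =>
      if merged.any (fun p => decide (p.1 ≤ b.1) && decide (b.1 ≤ p.2)) then c - 1 else c)
    covered

-- ===== PORT B =====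
-- body of B's first loop: append the ±1 boundary events, keep the beacon x-coordinates
def pvStepB (target : Int) (st : List (Int × Int) × PySem.Set Int)
    (q : Int × Int × Int × Int) : List (Int × Int) × PySem.Set Int :=
  let r := |q.1 - q.2.2.1| + |q.2.1 - q.2.2.2| - |q.2.1 - target|
  ((if 0 ≤ r then st.1 ++ [(q.1 - r, 1), (q.1 + r + 1, -1)] else st.1),
   (if q.2.2.2 == target then PySem.Set.add st.2 q.2.2.1 else st.2))

-- B's sweep body: state (covered, active, prev)
def pvSweepStep (s : Int × Int × Int) (e : Int × Int) : Int × Int × Int :=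
  ((if 0 < s.2.1 then s.1 + (e.1 - s.2.2) else s.1), s.2.1 + e.2, e.1)

-- sum(d for x, d in events if x <= bx)
def pvESum (events : List (Int × Int)) (bx : Int) : Int :=
  ((events.filter (fun e => decide (e.1 ≤ bx))).map Prod.snd).sum

def part1_intervals_alt (data : List (Int × Int × Int × Int)) (target : Int) : Int :=
  let st := data.foldl (pvStepB target) ([], PySem.Set.empty)
  let s := (PySem.List.sorted2 st.1 (fun e => e.1) (fun e => e.2)).foldl pvSweepStep (0, 0, 0)
  s.1 - (st.2.countP (fun bx => decide (0 < pvESum st.1 bx)) : Int)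

-- ===== PRECONDITION & SPEC =====
def Spec_part1_intervals (data : List (Int × Int × Int × Int)) (target : Int) (out : Int) : Prop := out = part1_intervals_alt data target
instance (data : List (Int × Int × Int × Int)) (target : Int) (out : Int) : Decidable (Spec_part1_intervals data target out) := by unfold Spec_part1_intervals; infer_instance

-- ===== CLAIM (what is proved, stated in full; the proofs are below) =====
def Claim_equal_part1_intervals : Prop := ∀ (data : List (Int × Int × Int × Int)) (target : Int), Dom_part1_intervals data target → Spec_part1_intervals data target (part1_intervals data target)

-- ===== LEMMAS AND PROOFS =====

-- the interval / event / beacon components of the two gather loops, taken separately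
def pvIvStep (target : Int) (acc : List (Int × Int)) (q : Int × Int × Int × Int) :
    List (Int × Int) :=
  let d := |q.1 - q.2.2.1| + |q.2.1 - q.2.2.2|
  let dy := |q.2.1 - target|
  if dy ≤ d then acc ++ [(q.1 - (d - dy), q.1 + (d - dy))] else acc

def pvEvStep (target : Int) (acc : List (Int × Int)) (q : Int × Int × Int × Int) :
    List (Int × Int) :=
  let r := |q.1 - q.2.2.1| + |q.2.1 - q.2.2.2| - |q.2.1 - target|
  if 0 ≤ r then acc ++ [(q.1 - r, 1), (q.1 + r + 1, -1)] else acc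

def pvBcAStep (target : Int) (s : PySem.Set (Int × Int)) (q : Int × Int × Int × Int) :
    PySem.Set (Int × Int) :=
  if q.2.2.2 == target then PySem.Set.add s (q.2.2.1, q.2.2.2) else s

def pvBcBStep (target : Int) (s : PySem.Set Int) (q : Int × Int × Int × Int) :
    PySem.Set Int :=
  if q.2.2.2 == target then PySem.Set.add s q.2.2.1 else s

-- x is covered by some interval of l
def pvCovers (l : List (Int × Int)) (x : Int) : Prop := ∃ p ∈ l, p.1 ≤ x ∧ x ≤ p.2

def pvSumLen (l : List (Int × Int)) : Int := (l.map (fun p => p.2 - p.1 + 1)).sum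

-- the boundary events of an interval list
def pvEventsOf (l : List (Int × Int)) : List (Int × Int) :=
  l.flatMap (fun p => [(p.1, 1), (p.2 + 1, -1)])

-- number of integers y in [lo, hi) satisfying c
def pvCnt (lo hi : Int) (c : Int → Bool) : ℕ :=
  (List.range (hi - lo).toNat).countP (fun k : Nat => c (lo + (k : Int)))

-- a bound strictly above |pos| of every event
def pvBound (E : List (Int × Int)) : Int := (E.map (fun e => |e.1|)).sum + 1

-- merged accumulator well-formedness: intervals nonempty, inside [lo,hi), later-in-list
-- intervals strictly left of earlier ones with a gap
def pvMgInv (lo hi : Int) (mg : List (Int × Int)) : Prop :=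
  (∀ p ∈ mg, p.1 ≤ p.2 ∧ lo ≤ p.1 ∧ p.2 < hi) ∧ mg.Pairwise (fun a b => b.2 + 1 < a.1)

theorem pv_foldl_stepA (data : List (Int × Int × Int × Int)) (target : Int) :
    ∀ (i : List (Int × Int)) (s : PySem.Set (Int × Int)),
      data.foldl (pvStepA target) (i, s)
        = (data.foldl (pvIvStep target) i, data.foldl (pvBcAStep target) s) := by
  induction data with
  | nil => intro i s; rfl
  | cons q data ih => intro i s; exact ih _ _

theorem pv_foldl_stepB (data : List (Int × Int × Int × Int)) (target : Int) :
    ∀ (e : List (Int × Int)) (s : PySem.Set Int),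
      data.foldl (pvStepB target) (e, s)
        = (data.foldl (pvEvStep target) e, data.foldl (pvBcBStep target) s) := by
  induction data with
  | nil => intro e s; rfl
  | cons q data ih => intro e s; exact ih _ _

-- B's event loop computes exactly the boundary events of A's interval loop
theorem pv_ev_iv (data : List (Int × Int × Int × Int)) (target : Int) :
    ∀ i : List (Int × Int),
      data.foldl (pvEvStep target) (pvEventsOf i)
        = pvEventsOf (data.foldl (pvIvStep target) i) := by
  induction data with
  | nil => intro i; rfl
  | cons q data ih =>
    intro i
    rw [List.foldl_cons, List.foldl_cons]
    have hstep : pvEvStep target (pvEventsOf i) q = pvEventsOf (pvIvStep target i q) := by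
      unfold pvEvStep pvIvStep
      by_cases hc : |q.2.1 - target| ≤ |q.1 - q.2.2.1| + |q.2.1 - q.2.2.2|
      · rw [if_pos hc, if_pos (by omega)]
        simp [pvEventsOf, List.flatMap_append]
      · rw [if_neg hc, if_neg (by omega)]
    rw [hstep]
    exact ih (pvIvStep target i q)

theorem pv_add_map (bs : List Int) (x target : Int) :
    PySem.Set.add (bs.map (fun x => (x, target))) (x, target)
      = (PySem.Set.add bs x).map (fun x => (x, target)) := by
  rw [PySem.Set.add_eq_ite, PySem.Set.add_eq_ite]
  have hmem : (x, target) ∈ bs.map (fun x => (x, target)) ↔ x ∈ bs := by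
    simp [List.mem_map]
  by_cases hx : x ∈ bs
  · simp [hx, hmem.mpr hx]
  · simp [hx, hmem, List.map_append]

-- A's beacon set is B's beacon-x set paired with target
theorem pv_bc_rel (data : List (Int × Int × Int × Int)) (target : Int) :
    ∀ bs : List Int,
      data.foldl (pvBcAStep target) (bs.map (fun x => (x, target)))
        = (data.foldl (pvBcBStep target) bs).map (fun x => (x, target)) := by
  induction data with
  | nil => intro bs; rfl
  | cons q data ih =>
    intro bs
    rw [List.foldl_cons, List.foldl_cons]
    have hstep : pvBcAStep target (bs.map (fun x => (x, target))) q
        = (pvBcBStep target bs q).map (fun x => (x, target)) := by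
      unfold pvBcAStep pvBcBStep
      by_cases hb : q.2.2.2 = target
      · rw [hb]
        simp only [beq_self_eq_true, if_true]
        exact pv_add_map bs q.2.2.1 target
      · have hb' : (q.2.2.2 == target) = false := by simp [hb]
        simp only [hb', Bool.false_eq_true, if_false]
    rw [hstep]
    exact ih (pvBcBStep target bs q)

-- every interval A collects is nonempty (lo ≤ hi)
theorem pv_iv_wf (data : List (Int × Int × Int × Int)) (target : Int) :
    ∀ i : List (Int × Int), (∀ p ∈ i, p.1 ≤ p.2) →
      ∀ p ∈ data.foldl (pvIvStep target) i, p.1 ≤ p.2 := by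
  induction data with
  | nil => intro i h; exact h
  | cons q data ih =>
    intro i h
    rw [List.foldl_cons]
    apply ih
    intro p hp
    unfold pvIvStep at hp
    by_cases hc : |q.2.1 - target| ≤ |q.1 - q.2.2.1| + |q.2.1 - q.2.2.2|
    · rw [if_pos hc] at hp
      rcases List.mem_append.mp hp with hp | hp
      · exact h p hp
      · rcases List.mem_singleton.mp hp with rfl
        simp only
        omega
    · rw [if_neg hc] at hp
      exact h p hp

theorem pv_insertBy_pairwise {α : Type} (key : α → Int) (before : α → α → Bool)
    (hb : ∀ a b, before a b = true → key a ≤ key b)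
    (hnb : ∀ a b, before a b = false → key b ≤ key a) (x : α) :
    ∀ l : List α, l.Pairwise (fun a b => key a ≤ key b) →
      (PySem.List.insertBy before x l).Pairwise (fun a b => key a ≤ key b) := by
  intro l
  induction l with
  | nil => intro _; simp [PySem.List.insertBy]
  | cons y ys ih =>
    intro h
    rw [List.pairwise_cons] at h
    simp only [PySem.List.insertBy]
    cases hby : before x y
    · simp only [Bool.false_eq_true, if_false]
      rw [List.pairwise_cons]
      constructor
      · intro z hz
        rw [PySem.List.insertBy_mem_iff] at hz
        rcases hz with hz | hz
        · subst hz; exact hnb _ _ hby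
        · exact h.1 z hz
      · exact ih h.2
    · simp only [if_true]
      rw [List.pairwise_cons]
      refine ⟨?_, List.pairwise_cons.mpr h⟩
      intro z hz
      rcases List.mem_cons.mp hz with hz | hz
      · subst hz; exact hb _ _ hby
      · exact le_trans (hb _ _ hby) (h.1 z hz)

theorem pv_foldl_insertBy_pairwise {α : Type} (key : α → Int) (before : α → α → Bool)
    (hb : ∀ a b, before a b = true → key a ≤ key b)
    (hnb : ∀ a b, before a b = false → key b ≤ key a) :
    ∀ (xs acc : List α), acc.Pairwise (fun a b => key a ≤ key b) →
      (xs.foldl (fun acc x => PySem.List.insertBy before x acc) acc).Pairwise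
        (fun a b => key a ≤ key b) := by
  intro xs
  induction xs with
  | nil => intro acc h; exact h
  | cons x xs ih =>
    intro acc h
    exact ih _ (pv_insertBy_pairwise key before hb hnb x acc h)

-- sorted2 by the pair is in particular nondecreasing in the first component
theorem pv_sorted2_fst_le (xs : List (Int × Int)) :
    (PySem.List.sorted2 xs (fun p => p.1) (fun p => p.2)).Pairwise (fun a b => a.1 ≤ b.1) := by
  simp only [PySem.List.sorted2, Bool.false_eq_true, if_false]
  refine pv_foldl_insertBy_pairwise (fun p => p.1)
    (fun a b => decide (a.1 < b.1) || !decide (b.1 < a.1) && decide (a.2 < b.2)) ?_ ?_ xs []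
    List.Pairwise.nil
  · intro a b hab
    simp only [Bool.or_eq_true, Bool.and_eq_true, Bool.not_eq_true', decide_eq_true_eq,
      decide_eq_false_iff_not] at hab
    show a.1 ≤ b.1
    rcases hab with h | ⟨h, _⟩ <;> omega
  · intro a b hab
    simp only [Bool.or_eq_false_iff, Bool.and_eq_false_iff, decide_eq_false_iff_not] at hab
    show b.1 ≤ a.1
    obtain ⟨h, -⟩ := hab
    omega

theorem pv_merge_step_covers (mg : List (Int × Int)) (p : Int × Int) (x : Int)
    (hhd : ∀ q, mg.head? = some q → q.1 ≤ p.1) :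
    pvCovers (pvMergeStep mg p) x ↔ pvCovers mg x ∨ (p.1 ≤ x ∧ x ≤ p.2) := by
  cases mg with
  | nil => simp [pvMergeStep, pvCovers]
  | cons q rest =>
    obtain ⟨l, h⟩ := q
    have hl : l ≤ p.1 := hhd (l, h) rfl
    by_cases hgap : h + 1 < p.1
    · simp only [pvMergeStep, if_pos hgap, pvCovers, List.mem_cons]
      constructor
      · rintro ⟨r, hr, h1, h2⟩
        rcases hr with rfl | rfl | hr
        · exact Or.inr ⟨h1, h2⟩
        · exact Or.inl ⟨_, Or.inl rfl, h1, h2⟩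
        · exact Or.inl ⟨_, Or.inr hr, h1, h2⟩
      · rintro (⟨r, hr, h1, h2⟩ | ⟨h1, h2⟩)
        · rcases hr with rfl | hr
          · exact ⟨_, Or.inr (Or.inl rfl), h1, h2⟩
          · exact ⟨_, Or.inr (Or.inr hr), h1, h2⟩
        · exact ⟨_, Or.inl rfl, h1, h2⟩
    · simp only [pvMergeStep, if_neg hgap, pvCovers, List.mem_cons]
      constructor
      · rintro ⟨r, hr, h1, h2⟩
        rcases hr with rfl | hr
        · simp only at h1 h2
          by_cases hx : x ≤ h
          · exact Or.inl ⟨(l, h), Or.inl rfl, h1, hx⟩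
          · exact Or.inr ⟨by omega, by omega⟩
        · exact Or.inl ⟨r, Or.inr hr, h1, h2⟩
      · rintro (⟨r, hr, h1, h2⟩ | ⟨h1, h2⟩)
        · rcases hr with rfl | hr
          · exact ⟨(l, max h p.2), Or.inl rfl, h1, by simp only at h2 ⊢; omega⟩
          · exact ⟨r, Or.inr hr, h1, h2⟩
        · exact ⟨(l, max h p.2), Or.inl rfl, by omega, by simp only; omega⟩

-- merging preserves the covered set
theorem pv_merge_covers (xs : List (Int × Int)) :
    ∀ (mg : List (Int × Int)) (x : Int),
      xs.Pairwise (fun a b => a.1 ≤ b.1) →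
      (∀ p ∈ xs, ∀ q, mg.head? = some q → q.1 ≤ p.1) →
      (pvCovers (xs.foldl pvMergeStep mg) x ↔ pvCovers mg x ∨ pvCovers xs x) := by
  induction xs with
  | nil => intro mg x _ _; simp [pvCovers]
  | cons p xs ih =>
    intro mg x hpair hhd
    rw [List.pairwise_cons] at hpair
    simp only [List.foldl_cons]
    have hhd' : ∀ r ∈ xs, ∀ q, (pvMergeStep mg p).head? = some q → q.1 ≤ r.1 := by
      intro r hr q hq
      cases mg with
      | nil =>
        simp only [pvMergeStep, List.head?] at hq
        cases hq
        exact hpair.1 r hr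
      | cons m rest =>
        obtain ⟨l, h⟩ := m
        by_cases hgap : h + 1 < p.1
        · simp only [pvMergeStep, if_pos hgap, List.head?] at hq
          cases hq
          exact hpair.1 r hr
        · simp only [pvMergeStep, if_neg hgap, List.head?] at hq
          cases hq
          exact le_trans (hhd p (List.mem_cons_self ..) (l, h) rfl) (hpair.1 r hr)
    rw [ih (pvMergeStep mg p) x hpair.2 hhd']
    rw [pv_merge_step_covers mg p x (fun q hq => hhd p (List.mem_cons_self ..) q hq)]
    have hc : pvCovers (p :: xs) x ↔ (p.1 ≤ x ∧ x ≤ p.2) ∨ pvCovers xs x := by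
      simp only [pvCovers, List.mem_cons]
      constructor
      · rintro ⟨r, hr, h1, h2⟩
        rcases hr with rfl | hr
        · exact Or.inl ⟨h1, h2⟩
        · exact Or.inr ⟨r, hr, h1, h2⟩
      · rintro (⟨h1, h2⟩ | ⟨r, hr, h1, h2⟩)
        · exact ⟨p, Or.inl rfl, h1, h2⟩
        · exact ⟨r, Or.inr hr, h1, h2⟩
    rw [hc]
    tauto

-- a single merge step preserves the structural invariant
theorem pv_merge_step_inv (lo hi : Int) (mg : List (Int × Int)) (p : Int × Int)
    (hp : p.1 ≤ p.2 ∧ lo ≤ p.1 ∧ p.2 < hi) (hmg : pvMgInv lo hi mg) :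
    pvMgInv lo hi (pvMergeStep mg p) := by
  obtain ⟨hall, hsep⟩ := hmg
  cases mg with
  | nil =>
    refine ⟨?_, ?_⟩
    · intro q hq
      rcases List.mem_singleton.mp hq with rfl
      exact ⟨hp.1, hp.2.1, hp.2.2⟩
    · simp [pvMergeStep]
  | cons q rest =>
    obtain ⟨l, h⟩ := q
    have hlh := hall (l, h) (List.mem_cons_self ..)
    rw [List.pairwise_cons] at hsep
    by_cases hgap : h + 1 < p.1
    · simp only [pvMergeStep, if_pos hgap]
      refine ⟨?_, ?_⟩
      · intro r hr
        rcases List.mem_cons.mp hr with rfl | hr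
        · exact ⟨hp.1, hp.2.1, hp.2.2⟩
        · exact hall r hr
      · rw [List.pairwise_cons]
        refine ⟨?_, List.pairwise_cons.mpr hsep⟩
        intro r hr
        rcases List.mem_cons.mp hr with rfl | hr
        · simpa using hgap
        · have := hsep.1 r hr
          simp only at this ⊢
          omega
    · simp only [pvMergeStep, if_neg hgap]
      refine ⟨?_, ?_⟩
      · intro r hr
        rcases List.mem_cons.mp hr with rfl | hr
        · refine ⟨?_, hlh.2.1, ?_⟩ <;> simp only <;> omega
        · exact hall r (List.mem_cons_of_mem _ hr)
      · rw [List.pairwise_cons]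
        refine ⟨?_, hsep.2⟩
        intro r hr
        have := hsep.1 r hr
        simp only at this ⊢
        omega

theorem pv_merge_inv (lo hi : Int) (xs : List (Int × Int)) :
    ∀ mg, (∀ p ∈ xs, p.1 ≤ p.2 ∧ lo ≤ p.1 ∧ p.2 < hi) → pvMgInv lo hi mg →
      pvMgInv lo hi (xs.foldl pvMergeStep mg) := by
  induction xs with
  | nil => intro mg _ h; exact h
  | cons p xs ih =>
    intro mg hxs hmg
    exact ih _ (fun q hq => hxs q (List.mem_cons_of_mem _ hq))
      (pv_merge_step_inv lo hi mg p (hxs p (List.mem_cons_self ..)) hmg)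

-- counting helpers ---------------------------------------------------------

theorem pvCnt_congr (lo hi : Int) (c c' : Int → Bool)
    (h : ∀ y, lo ≤ y → y < hi → c y = c' y) : pvCnt lo hi c = pvCnt lo hi c' := by
  unfold pvCnt
  apply List.countP_congr
  intro k hk
  rw [List.mem_range] at hk
  have hk' : (k : Int) < hi - lo := by omega
  rw [h (lo + (k : Int)) (by omega) (by omega)]

theorem pvCnt_false (lo hi : Int) (c : Int → Bool)
    (h : ∀ y, lo ≤ y → y < hi → c y = false) : pvCnt lo hi c = 0 := by
  unfold pvCnt
  apply List.countP_eq_zero.mpr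
  intro k hk
  rw [List.mem_range] at hk
  have hk' : (k : Int) < hi - lo := by omega
  simp [h (lo + (k : Int)) (by omega) (by omega)]

theorem pvCnt_true (lo hi : Int) (c : Int → Bool)
    (h : ∀ y, lo ≤ y → y < hi → c y = true) : (pvCnt lo hi c : Int) = max 0 (hi - lo) := by
  unfold pvCnt
  rw [List.countP_eq_length.mpr, List.length_range]
  · omega
  · intro k hk
    rw [List.mem_range] at hk
    have hk' : (k : Int) < hi - lo := by omega
    simp [h (lo + (k : Int)) (by omega) (by omega)]

theorem pvCnt_split (lo mid hi : Int) (h1 : lo ≤ mid) (h2 : mid ≤ hi) (c : Int → Bool) :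
    pvCnt lo hi c = pvCnt lo mid c + pvCnt mid hi c := by
  unfold pvCnt
  have hlen : (hi - lo).toNat = (mid - lo).toNat + (hi - mid).toNat := by omega
  rw [hlen, List.range_add, List.countP_append, List.countP_map]
  congr 1
  apply List.countP_congr
  intro k hk
  rw [List.mem_range] at hk
  have : lo + ((mid - lo).toNat + k : Nat) = mid + (k : Int) := by
    push_cast
    omega
  simp only [Function.comp_apply, this]

theorem pvCnt_between (lo hi l h : Int) (h1 : lo ≤ l) (h2 : h < hi) (hlh : l ≤ h) :
    (pvCnt lo hi (fun y => decide (l ≤ y) && decide (y ≤ h)) : Int) = h + 1 - l := by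
  have hsp1 : pvCnt lo hi (fun y => decide (l ≤ y) && decide (y ≤ h))
      = pvCnt lo l (fun y => decide (l ≤ y) && decide (y ≤ h))
        + pvCnt l hi (fun y => decide (l ≤ y) && decide (y ≤ h)) :=
    pvCnt_split lo l hi h1 (by omega) _
  have hsp2 : pvCnt l hi (fun y => decide (l ≤ y) && decide (y ≤ h))
      = pvCnt l (h + 1) (fun y => decide (l ≤ y) && decide (y ≤ h))
        + pvCnt (h + 1) hi (fun y => decide (l ≤ y) && decide (y ≤ h)) :=
    pvCnt_split l (h + 1) hi (by omega) (by omega) _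
  have hz1 : pvCnt lo l (fun y => decide (l ≤ y) && decide (y ≤ h)) = 0 := by
    apply pvCnt_false
    intro y hy1 hy2
    simp only [Bool.and_eq_false_iff, decide_eq_false_iff_not]
    left
    omega
  have hz2 : pvCnt (h + 1) hi (fun y => decide (l ≤ y) && decide (y ≤ h)) = 0 := by
    apply pvCnt_false
    intro y hy1 hy2
    simp only [Bool.and_eq_false_iff, decide_eq_false_iff_not]
    right
    omega
  have hmid : (pvCnt l (h + 1) (fun y => decide (l ≤ y) && decide (y ≤ h)) : Int)
      = max 0 (h + 1 - l) := by
    apply pvCnt_true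
    intro y hy1 hy2
    simp only [Bool.and_eq_true, decide_eq_true_eq]
    omega
  rw [hsp1, hsp2, hz1, hz2]
  push_cast
  omega

theorem pvCnt_or_disjoint (lo hi : Int) (c1 c2 : Int → Bool)
    (h : ∀ y, ¬(c1 y = true ∧ c2 y = true)) :
    pvCnt lo hi (fun y => c1 y || c2 y) = pvCnt lo hi c1 + pvCnt lo hi c2 := by
  unfold pvCnt
  induction List.range (hi - lo).toNat with
  | nil => rfl
  | cons k ks ih =>
    simp only [List.countP_cons, ih]
    have := h (lo + (k : Int))
    cases hc1 : c1 (lo + (k : Int)) <;> cases hc2 : c2 (lo + (k : Int)) <;>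
      simp_all <;> omega

-- the merged length is the number of covered points in any enclosing window
theorem pv_sumlen_cnt (lo hi : Int) :
    ∀ mg : List (Int × Int), pvMgInv lo hi mg →
      pvSumLen mg
        = (pvCnt lo hi (fun y => mg.any (fun p => decide (p.1 ≤ y) && decide (y ≤ p.2))) : Int) := by
  intro mg
  induction mg with
  | nil =>
    intro _
    rw [pvCnt_false lo hi _ (fun y _ _ => by simp)]
    simp [pvSumLen]
  | cons q rest ih =>
    intro hinv
    obtain ⟨l, h⟩ := q
    obtain ⟨hall, hsep⟩ := hinv
    rw [List.pairwise_cons] at hsep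
    have hlh := hall (l, h) (List.mem_cons_self ..)
    have hcongr : pvCnt lo hi
        (fun y => ((l, h) :: rest).any (fun p => decide (p.1 ≤ y) && decide (y ≤ p.2)))
        = pvCnt lo hi (fun y => (decide (l ≤ y) && decide (y ≤ h))
            || rest.any (fun p => decide (p.1 ≤ y) && decide (y ≤ p.2))) := by
      apply pvCnt_congr
      intro y _ _
      simp [List.any_cons]
    rw [hcongr, pvCnt_or_disjoint lo hi _ _ ?disj]
    case disj =>
      intro y hy
      obtain ⟨h1, h2⟩ := hy
      simp only [Bool.and_eq_true, decide_eq_true_eq] at h1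
      rw [List.any_eq_true] at h2
      obtain ⟨p, hp, hpy⟩ := h2
      simp only [Bool.and_eq_true, decide_eq_true_eq] at hpy
      have := hsep.1 p hp
      omega
    have hbet := pvCnt_between lo hi l h hlh.2.1 hlh.2.2 hlh.1
    have hrest : pvSumLen rest
        = (pvCnt lo hi (fun y => rest.any (fun p => decide (p.1 ≤ y) && decide (y ≤ p.2))) : Int) :=
      ih ⟨fun p hp => hall p (List.mem_cons_of_mem _ hp), hsep.2⟩
    simp only [pvSumLen, List.map_cons, List.sum_cons] at hrest ⊢
    push_cast
    omega

-- event sums ---------------------------------------------------------------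

theorem pvESum_cons (e : Int × Int) (E : List (Int × Int)) (y : Int) :
    pvESum (e :: E) y = (if e.1 ≤ y then e.2 else 0) + pvESum E y := by
  by_cases h : e.1 ≤ y <;> simp [pvESum, h]

theorem pvESum_zero_of_lt (E : List (Int × Int)) (y : Int) (h : ∀ e ∈ E, y < e.1) :
    pvESum E y = 0 := by
  unfold pvESum
  rw [List.filter_eq_nil_iff.mpr]
  · rfl
  · intro e he
    simp only [decide_eq_true_eq, not_le]
    have := h e he
    omega

theorem pvESum_perm (E E' : List (Int × Int)) (h : E.Perm E') (y : Int) :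
    pvESum E y = pvESum E' y := by
  unfold pvESum
  exact ((h.filter _).map _).sum_eq

theorem pv_sum_snd_eventsOf (L : List (Int × Int)) :
    ((pvEventsOf L).map Prod.snd).sum = 0 := by
  induction L with
  | nil => rfl
  | cons p L ih =>
    simp only [pvEventsOf] at ih ⊢
    simp [ih]

theorem pvESum_eventsOf (L : List (Int × Int)) (y : Int) (hwf : ∀ p ∈ L, p.1 ≤ p.2) :
    pvESum (pvEventsOf L) y
      = (L.countP (fun p => decide (p.1 ≤ y) && decide (y ≤ p.2)) : Int) := by
  induction L with
  | nil => rfl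
  | cons p L ih =>
    have hp := hwf p (List.mem_cons_self ..)
    have hEv : pvEventsOf (p :: L) = (p.1, 1) :: (p.2 + 1, -1) :: pvEventsOf L := by
      simp [pvEventsOf]
    rw [hEv, pvESum_cons, pvESum_cons,
      ih (fun q hq => hwf q (List.mem_cons_of_mem _ hq)), List.countP_cons]
    push_cast
    by_cases h1 : p.1 ≤ y <;> by_cases h2 : y ≤ p.2 <;>
      simp [h1, h2] <;> omega

theorem pv_abs_lt_bound (E : List (Int × Int)) : ∀ e ∈ E, |e.1| < pvBound E := by
  induction E with
  | nil => intro e he; cases he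
  | cons f E ih =>
    intro e he
    have hnn : 0 ≤ (E.map (fun e => |e.1|)).sum :=
      List.sum_nonneg (by
        intro x hx
        rw [List.mem_map] at hx
        obtain ⟨q, _, rfl⟩ := hx
        exact abs_nonneg _)
    rcases List.mem_cons.mp he with rfl | he
    · simp only [pvBound, List.map_cons, List.sum_cons]
      omega
    · have := ih e he
      have hf : 0 ≤ |f.1| := abs_nonneg _
      simp only [pvBound, List.map_cons, List.sum_cons] at *
      omega

-- the sweep over sorted events counts points with positive prefix-sum ------
theorem pv_sweep_count (P : Int) :
    ∀ (R : List (Int × Int)) (c a prev : Int),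
      R.Pairwise (fun e f => e.1 ≤ f.1) →
      (∀ e ∈ R, prev ≤ e.1 ∧ e.1 ≤ P) →
      a + (R.map Prod.snd).sum ≤ 0 →
      prev ≤ P →
      (R.foldl pvSweepStep (c, a, prev)).1
        = c + (pvCnt prev P (fun y => decide (0 < a + pvESum R y)) : Int) := by
  intro R
  induction R with
  | nil =>
    intro c a prev _ _ hsum _
    simp only [List.map_nil, List.sum_nil, add_zero] at hsum
    rw [pvCnt_false prev P _ (fun y _ _ => by
      simp only [pvESum, List.filter_nil, List.map_nil, List.sum_nil, add_zero,
        decide_eq_false_iff_not, not_lt]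
      omega)]
    simp
  | cons e R ih =>
    intro c a prev hpair hmem hsum hprev
    obtain ⟨x, d⟩ := e
    rw [List.pairwise_cons] at hpair
    have hpx : prev ≤ x := (hmem (x, d) (List.mem_cons_self ..)).1
    have hxP : x ≤ P := (hmem (x, d) (List.mem_cons_self ..)).2
    have hstep : pvSweepStep (c, a, prev) (x, d)
        = ((if 0 < a then c + (x - prev) else c), a + d, x) := rfl
    rw [List.foldl_cons, hstep]
    have hR := ih (if 0 < a then c + (x - prev) else c) (a + d) x
      hpair.2
      (fun f hf => ⟨hpair.1 f hf, (hmem f (List.mem_cons_of_mem _ hf)).2⟩)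
      (by simp only [List.map_cons, List.sum_cons] at hsum ⊢; omega)
      hxP
    rw [hR]
    have hsplit := pvCnt_split prev x P hpx hxP
      (fun y => decide (0 < a + pvESum ((x, d) :: R) y))
    have hlow : (pvCnt prev x (fun y => decide (0 < a + pvESum ((x, d) :: R) y)) : Int)
        = if 0 < a then x - prev else 0 := by
      have hc : pvCnt prev x (fun y => decide (0 < a + pvESum ((x, d) :: R) y))
          = pvCnt prev x (fun y => decide (0 < a)) := by
        apply pvCnt_congr
        intro y _ hy2
        have hz : pvESum ((x, d) :: R) y = 0 := by
          apply pvESum_zero_of_lt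
          intro f hf
          rcases List.mem_cons.mp hf with rfl | hf
          · exact hy2
          · have := hpair.1 f hf
            omega
        rw [hz, add_zero]
      rw [hc]
      by_cases ha : 0 < a
      · rw [if_pos ha, pvCnt_true prev x _ (fun y _ _ => by simp [ha])]
        omega
      · rw [if_neg ha, pvCnt_false prev x _ (fun y _ _ => by simp [ha])]
        simp
    have hhigh : pvCnt x P (fun y => decide (0 < a + pvESum ((x, d) :: R) y))
        = pvCnt x P (fun y => decide (0 < a + d + pvESum R y)) := by
      apply pvCnt_congr
      intro y hy1 _
      rw [pvESum_cons]
      simp only [if_pos hy1]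
      rw [← add_assoc]
    rw [hsplit, hhigh]
    push_cast
    rw [hlow]
    split_ifs <;> omega

-- misc reused helpers ------------------------------------------------------

theorem pv_foldl_sub {α : Type} (S : List α) (P : α → Bool) :
    ∀ c : Int, S.foldl (fun c b => if P b then c - 1 else c) c = c - (S.countP P : Int) := by
  induction S with
  | nil => intro c; simp
  | cons b S ih =>
    intro c
    simp only [List.foldl_cons, List.countP_cons]
    cases hb : P b
    · simp only [Bool.false_eq_true, if_false]
      rw [ih]; simp
    · simp only [if_true]
      rw [ih]; push_cast; ring

theorem pv_sumlen_foldl (l : List (Int × Int)) :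
    ∀ c : Int, l.foldl (fun s p => s + (p.2 - p.1 + 1)) c = c + pvSumLen l := by
  induction l with
  | nil => intro c; simp [pvSumLen]
  | cons p l ih =>
    intro c
    simp only [List.foldl_cons]
    rw [ih]
    simp only [pvSumLen, List.map_cons, List.sum_cons]
    ring

theorem pv_covers_any (l : List (Int × Int)) (x : Int) :
    (l.any (fun p => decide (p.1 ≤ x) && decide (x ≤ p.2)) = true) ↔ pvCovers l x := by
  simp [List.any_eq_true, pvCovers]

theorem pv_sumlen_reverse (l : List (Int × Int)) : pvSumLen l.reverse = pvSumLen l := by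
  simp [pvSumLen]

theorem pv_covers_reverse (l : List (Int × Int)) (x : Int) :
    pvCovers l.reverse x ↔ pvCovers l x := by
  simp [pvCovers]

theorem pv_covers_perm {l l' : List (Int × Int)} (h : l.Perm l') (x : Int) :
    pvCovers l x ↔ pvCovers l' x := by
  simp only [pvCovers]
  constructor <;> rintro ⟨p, hp, h1, h2⟩
  · exact ⟨p, h.mem_iff.mp hp, h1, h2⟩
  · exact ⟨p, h.mem_iff.mpr hp, h1, h2⟩

theorem pv_bool_ext (b c : Bool) (h : b = true ↔ c = true) : b = c := by
  cases b <;> cases c <;> simp_all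

-- ===== VERDICT (by name: the statement is the Claim_ definition above) =====
theorem part1_intervals_spec : Claim_equal_part1_intervals := by
  intro data target _
  unfold Spec_part1_intervals
  have hA : data.foldl (pvStepA target) ([], PySem.Set.empty)
      = (data.foldl (pvIvStep target) [], data.foldl (pvBcAStep target) PySem.Set.empty) :=
    pv_foldl_stepA data target [] PySem.Set.empty
  have hBst : data.foldl (pvStepB target) ([], PySem.Set.empty)
      = (data.foldl (pvEvStep target) [], data.foldl (pvBcBStep target) PySem.Set.empty) :=
    pv_foldl_stepB data target [] PySem.Set.empty
  have hE : data.foldl (pvEvStep target) []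
      = pvEventsOf (data.foldl (pvIvStep target) []) := pv_ev_iv data target []
  have hBc : data.foldl (pvBcAStep target) PySem.Set.empty
      = (data.foldl (pvBcBStep target) PySem.Set.empty).map (fun x => (x, target)) :=
    pv_bc_rel data target []
  simp only [part1_intervals, part1_intervals_alt, hA, hBst, hE, hBc]
  set L := data.foldl (pvIvStep target) [] with hL
  set bxs := data.foldl (pvBcBStep target) PySem.Set.empty with hbxs
  set E := pvEventsOf L with hEdef
  set P := pvBound E with hP
  have hwfL : ∀ p ∈ L, p.1 ≤ p.2 := pv_iv_wf data target [] (by intro p hp; cases hp)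
  have hEb : ∀ e ∈ E, |e.1| < P := pv_abs_lt_bound E
  have hboolL : ∀ y, (L.any (fun p => decide (p.1 ≤ y) && decide (y ≤ p.2)) = true)
      ↔ (decide (0 < pvESum E y) = true) := by
    intro y
    rw [List.any_eq_true, decide_eq_true_eq, hEdef, pvESum_eventsOf L y hwfL,
      Int.natCast_pos, List.countP_pos_iff]
  set srtA := PySem.List.sorted2 L (fun p => p.1) (fun p => p.2) with hsA
  have permA : srtA.Perm L := PySem.List.sorted2_perm L _ _ false
  set mergedR := srtA.foldl pvMergeStep [] with hmr
  have hmcov : ∀ y, pvCovers mergedR y ↔ pvCovers L y := by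
    intro y
    rw [hmr, pv_merge_covers srtA [] y (pv_sorted2_fst_le L) (by intro p _ q hq; cases hq),
      pv_covers_perm permA]
    simp [pvCovers]
  have hbounds : ∀ p ∈ srtA, p.1 ≤ p.2 ∧ -P ≤ p.1 ∧ p.2 < P := by
    intro p hp
    have hpL : p ∈ L := permA.mem_iff.mp hp
    have h1 : (p.1, (1 : Int)) ∈ E := by
      rw [hEdef]; exact List.mem_flatMap.mpr ⟨p, hpL, by simp⟩
    have h2 : (p.2 + 1, (-1 : Int)) ∈ E := by
      rw [hEdef]; exact List.mem_flatMap.mpr ⟨p, hpL, by simp⟩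
    have ha1 := abs_lt.mp (hEb _ h1)
    have ha2 := abs_lt.mp (hEb _ h2)
    simp only at ha1 ha2
    exact ⟨hwfL p hpL, by omega, by omega⟩
  have hmrInv : pvMgInv (-P) P mergedR :=
    pv_merge_inv (-P) P srtA [] hbounds ⟨(by intro p hp; cases hp), List.Pairwise.nil⟩
  have hAlen : pvSumLen mergedR
      = (pvCnt (-P) P
          (fun y => mergedR.any (fun p => decide (p.1 ≤ y) && decide (y ≤ p.2))) : Int) :=
    pv_sumlen_cnt (-P) P mergedR hmrInv
  have hAcnt : pvCnt (-P) P
        (fun y => mergedR.any (fun p => decide (p.1 ≤ y) && decide (y ≤ p.2)))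
      = pvCnt (-P) P (fun y => decide (0 < pvESum E y)) := by
    apply pvCnt_congr
    intro y _ _
    exact pv_bool_ext _ _
      ((pv_covers_any mergedR y).trans ((hmcov y).trans
        ((pv_covers_any L y).symm.trans (hboolL y))))
  set srtB := PySem.List.sorted2 E (fun e => e.1) (fun e => e.2) with hsB
  have permB : srtB.Perm E := PySem.List.sorted2_perm E _ _ false
  have hsumE : (E.map Prod.snd).sum = 0 := by rw [hEdef]; exact pv_sum_snd_eventsOf L
  have hsweep : (srtB.foldl pvSweepStep (0, 0, 0)).1
      = (pvCnt (-P) P (fun y => decide (0 < pvESum E y)) : Int) := by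
    have hpairB0 := pv_sorted2_fst_le E
    cases hsrt : srtB with
    | nil =>
      have hEnil : E = [] := List.nil_perm.mp (hsrt ▸ permB)
      simp only [List.foldl_nil]
      rw [pvCnt_false _ _ _ (fun y _ _ => by rw [hEnil]; simp [pvESum])]
      simp
    | cons e R =>
      obtain ⟨x0, d0⟩ := e
      have hpairB : ((x0, d0) :: R).Pairwise (fun a b => a.1 ≤ b.1) := by
        rw [hsB] at hsrt
        rw [← hsrt]
        exact hpairB0
      rw [List.pairwise_cons] at hpairB
      have hmemB : ∀ f ∈ R, x0 ≤ f.1 ∧ f.1 ≤ P := by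
        intro f hf
        have hfE : f ∈ E := permB.mem_iff.mp (by rw [hsrt]; exact List.mem_cons_of_mem _ hf)
        have := abs_lt.mp (hEb f hfE)
        exact ⟨hpairB.1 f hf, by omega⟩
      have hx0E : (x0, d0) ∈ E := permB.mem_iff.mp (by rw [hsrt]; exact List.mem_cons_self ..)
      have hx0 := abs_lt.mp (hEb _ hx0E)
      simp only at hx0
      have hsum0 : d0 + (R.map Prod.snd).sum ≤ 0 := by
        have hsb : (srtB.map Prod.snd).sum = 0 := by
          rw [(permB.map Prod.snd).sum_eq]
          exact hsumE
        rw [hsrt] at hsb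
        simp only [List.map_cons, List.sum_cons] at hsb
        omega
      rw [List.foldl_cons]
      have hstep0 : pvSweepStep (0, 0, 0) (x0, d0) = ((0 : Int), d0, x0) := by
        simp [pvSweepStep]
      rw [hstep0, pv_sweep_count P R 0 d0 x0 hpairB.2 hmemB hsum0 (by omega)]
      have hup : pvCnt x0 P (fun y => decide (0 < d0 + pvESum R y))
          = pvCnt x0 P (fun y => decide (0 < pvESum E y)) := by
        apply pvCnt_congr
        intro y hy1 _
        have hpe : pvESum E y = pvESum srtB y := pvESum_perm E srtB permB.symm y
        rw [hpe, hsrt, pvESum_cons]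
        simp [hy1]
      have hsplit2 := pvCnt_split (-P) x0 P (by omega) (by omega)
        (fun y => decide (0 < pvESum E y))
      have hlow0 : pvCnt (-P) x0 (fun y => decide (0 < pvESum E y)) = 0 := by
        apply pvCnt_false
        intro y hy1 hy2
        have hz : pvESum E y = 0 := by
          rw [pvESum_perm E srtB permB.symm y, hsrt]
          apply pvESum_zero_of_lt
          intro f hf
          rcases List.mem_cons.mp hf with rfl | hf
          · exact hy2
          · have := hpairB.1 f hf
            omega
        simp [hz]
      rw [hup, hsplit2, hlow0]
      simp
  have hcnteq : (bxs.map (fun x => (x, target))).countP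
        (fun b => mergedR.reverse.any (fun p => decide (p.1 ≤ b.1) && decide (b.1 ≤ p.2)))
      = bxs.countP (fun bx => decide (0 < pvESum E bx)) := by
    rw [List.countP_map]
    apply List.countP_congr
    intro bx _
    exact (pv_covers_any mergedR.reverse bx).trans ((pv_covers_reverse mergedR bx).trans
      ((hmcov bx).trans ((pv_covers_any L bx).symm.trans (hboolL bx))))
  rw [pv_foldl_sub, pv_sumlen_foldl, pv_sumlen_reverse, hsweep, hAlen, hAcnt, hcnteq]
  ring
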